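-- pv_equiv track=rewrite | github.com/cbrockenbrough21/kTracker | accept_event/accept_event.py | accept_event
-- ===== SOURCE A (Python) =====
-- from collections import Counter
--
-- def accept_event(detector_ids, max_hits):
--     """
--     Applies occupancy cuts using detectorID list.
--
--     Parameters:
--     - detector_ids: list of int (one detector ID per hit in the event)
--     - max_hits: dictionary of max allowed hits per region (D0-D3m)
--
--     Returns:
--     - True if the event passes all occupancy cuts
--     - False otherwise
--     """
--
--     counts = Counter(detector_ids)
--
--     nHitsD0  = sum(counts[i] for i in range(1, 7))     # planes 1–6
--     nHitsD1  = sum(counts[i] for i in range(7, 13))    # 7–12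
--     nHitsD2  = sum(counts[i] for i in range(13, 19))   # 13–18
--     nHitsD3p = sum(counts[i] for i in range(19, 25))   # 19–24
--     nHitsD3m = sum(counts[i] for i in range(25, 31))   # 25–30
--
--     if nHitsD0  > max_hits["D0"]:  return False
--     if nHitsD1  > max_hits["D1"]:  return False
--     if nHitsD2  > max_hits["D2"]:  return False
--     if nHitsD3p > max_hits["D3p"]: return False
--     if nHitsD3m > max_hits["D3m"]: return False
--
--     return True
-- ===== SOURCE B (Python) =====
-- REGIONS = [("D0", 1, 6), ("D1", 7, 12), ("D2", 13, 18), ("D3p", 19, 24), ("D3m", 25, 30)]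
--
-- def accept_event(detector_ids, max_hits):
--     """Table-driven occupancy cut: loop over the region table, counting each
--     region's hits with a filtered scan and returning False on the first
--     exceeded region (no Counter/histogram is built)."""
--     for name, lo, hi in REGIONS:
--         if sum(1 for d in detector_ids if lo <= d <= hi) > max_hits[name]:
--             return False
--     return True
-- ===== Notes on version B (the rewrite author's own statement) =====
-- stated objective: simpler
-- what changed: Replaces the per-id Counter histogram plus five range sums and five hand-written checks by a table-driven loop over a region table [(name, lo, hi)], counting each region with a filtered scan and returning False at the first exceeded region.
import Mathlib
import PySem

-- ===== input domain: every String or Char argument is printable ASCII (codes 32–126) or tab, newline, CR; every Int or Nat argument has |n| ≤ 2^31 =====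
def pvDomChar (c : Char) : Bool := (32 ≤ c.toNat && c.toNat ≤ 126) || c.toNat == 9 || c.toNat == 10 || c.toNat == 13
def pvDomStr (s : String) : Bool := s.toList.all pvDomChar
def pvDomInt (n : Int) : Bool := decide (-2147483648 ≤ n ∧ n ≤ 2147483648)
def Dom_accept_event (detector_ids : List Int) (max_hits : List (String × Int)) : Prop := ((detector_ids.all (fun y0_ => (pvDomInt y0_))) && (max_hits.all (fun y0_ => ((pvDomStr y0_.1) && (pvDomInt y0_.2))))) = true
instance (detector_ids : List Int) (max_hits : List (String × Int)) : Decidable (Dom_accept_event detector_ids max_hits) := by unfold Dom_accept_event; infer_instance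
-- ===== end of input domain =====

-- B replaces the Counter histogram and five hand-written range sums/checks by a
-- table-driven loop over a region table, counting each region with a filtered
-- scan and returning at the first exceeded region; objective: simpler.

-- ===== PORT A =====
-- max_hits[k]; Pre_ guarantees k is present (Python raises KeyError on a missing key)
def pvLookup (max_hits : List (String × Int)) (k : String) : Int :=
  (PySem.Dict.ofList max_hits).getD k 0

def accept_event (detector_ids : List Int) (max_hits : List (String × Int)) : Bool :=
  let counts := PySem.Dict.counter detector_ids
  let nHitsD0  := ((PySem.List.pyRange 1 7 1).map (fun i => counts.getD i 0)).sum
  let nHitsD1  := ((PySem.List.pyRange 7 13 1).map (fun i => counts.getD i 0)).sum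
  let nHitsD2  := ((PySem.List.pyRange 13 19 1).map (fun i => counts.getD i 0)).sum
  let nHitsD3p := ((PySem.List.pyRange 19 25 1).map (fun i => counts.getD i 0)).sum
  let nHitsD3m := ((PySem.List.pyRange 25 31 1).map (fun i => counts.getD i 0)).sum
  if nHitsD0  > pvLookup max_hits "D0"  then false
  else if nHitsD1  > pvLookup max_hits "D1"  then false
  else if nHitsD2  > pvLookup max_hits "D2"  then false
  else if nHitsD3p > pvLookup max_hits "D3p" then false
  else if nHitsD3m > pvLookup max_hits "D3m" then false
  else true

-- ===== PORT B =====
-- the module-level REGIONS table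
def pvRegions : List (String × Int × Int) :=
  [("D0", 1, 6), ("D1", 7, 12), ("D2", 13, 18), ("D3p", 19, 24), ("D3m", 25, 30)]

-- the 'for name, lo, hi in REGIONS' loop with its early return
def pvRegionLoop (detector_ids : List Int) (max_hits : List (String × Int)) :
    List (String × Int × Int) → Bool
  | [] => true
  | (name, lo, hi) :: rest =>
      -- sum(1 for d in detector_ids if lo <= d <= hi)
      if (detector_ids.countP (fun d => decide (lo ≤ d ∧ d ≤ hi)) : Int) > pvLookup max_hits name
      then false
      else pvRegionLoop detector_ids max_hits rest

def accept_event_alt (detector_ids : List Int) (max_hits : List (String × Int)) : Bool :=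
  pvRegionLoop detector_ids max_hits pvRegions

-- ===== PRECONDITION & SPEC =====
-- helper for Pre_: hits counted in an id window
def pvCnt (l : List Int) (a b : Int) : Int := l.countP (fun x => decide (a ≤ x ∧ x ≤ b))

-- Pre_ is exactly where Python A returns: "D0" must be present, and each later region key is
-- consulted (KeyError if absent) only when every earlier region's cut passed.
def Pre_accept_event (detector_ids : List Int) (max_hits : List (String × Int)) : Prop :=
  "D0" ∈ max_hits.map Prod.fst ∧
  (pvCnt detector_ids 1 6 ≤ pvLookup max_hits "D0" →
    "D1" ∈ max_hits.map Prod.fst ∧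
    (pvCnt detector_ids 7 12 ≤ pvLookup max_hits "D1" →
      "D2" ∈ max_hits.map Prod.fst ∧
      (pvCnt detector_ids 13 18 ≤ pvLookup max_hits "D2" →
        "D3p" ∈ max_hits.map Prod.fst ∧
        (pvCnt detector_ids 19 24 ≤ pvLookup max_hits "D3p" →
          "D3m" ∈ max_hits.map Prod.fst))))
instance (detector_ids : List Int) (max_hits : List (String × Int)) : Decidable (Pre_accept_event detector_ids max_hits) := by unfold Pre_accept_event; infer_instance

def pvWitness_accept_event : List Int × (List (String × Int)) :=
  ([1, 8, 25, 25], [("D0", 3), ("D1", 3), ("D2", 3), ("D3p", 3), ("D3m", 3)])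

def Spec_accept_event (detector_ids : List Int) (max_hits : List (String × Int)) (out : Bool) : Prop := out = accept_event_alt detector_ids max_hits
instance (detector_ids : List Int) (max_hits : List (String × Int)) (out : Bool) : Decidable (Spec_accept_event detector_ids max_hits out) := by unfold Spec_accept_event; infer_instance

-- ===== CLAIM (what is proved, stated in full; the proofs are below) =====
def Claim_equal_accept_event : Prop := ∀ (detector_ids : List Int) (max_hits : List (String × Int)), Dom_accept_event detector_ids max_hits → Pre_accept_event detector_ids max_hits → Spec_accept_event detector_ids max_hits (accept_event detector_ids max_hits)

-- ===== LEMMAS AND PROOFS =====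

-- six consecutive multiplicities sum to a window count
theorem six_count (l : List Int) (a : Int) :
    ((l.count a : Int) + l.count (a+1) + l.count (a+2) + l.count (a+3) + l.count (a+4) + l.count (a+5))
      = l.countP (fun x => decide (a ≤ x ∧ x ≤ a + 5)) := by
  induction l with
  | nil => simp
  | cons x l ih =>
      simp only [List.count_cons, List.countP_cons]
      push_cast
      rcases eq_or_ne x a with h | h0 <;> rcases eq_or_ne x (a+1) with h | h1 <;>
        rcases eq_or_ne x (a+2) with h | h2 <;> rcases eq_or_ne x (a+3) with h | h3 <;>
        rcases eq_or_ne x (a+4) with h | h4 <;> rcases eq_or_ne x (a+5) with h | h5 <;>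
        simp_all <;> omega

theorem sumA (l : List Int) (a : Int) :
    ((PySem.List.pyRange a (a+6) 1).map (fun i => (PySem.Dict.counter l).getD i 0)).sum
      = (l.countP (fun x => decide (a ≤ x ∧ x ≤ a + 5)) : Int) := by
  have hr : PySem.List.pyRange a (a+6) 1 = [a, a+1, a+2, a+3, a+4, a+5] := by
    rw [PySem.List.pyRange_one_cons (by omega), PySem.List.pyRange_one_cons (by omega),
        PySem.List.pyRange_one_cons (by omega), PySem.List.pyRange_one_cons (by omega),
        PySem.List.pyRange_one_cons (by omega), PySem.List.pyRange_one_cons (by omega),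
        PySem.List.pyRange_one_eq_nil (by omega)]
    norm_num
    omega
  rw [hr]
  simp only [List.map_cons, List.map_nil, List.sum_cons, List.sum_nil,
    PySem.Dict.getD_counter]
  rw [← six_count l a]; ring

-- ===== VERDICT (by name: the statement is the Claim_ definition above) =====
theorem accept_event_spec : Claim_equal_accept_event := by
  intro l m _ _
  show accept_event l m = accept_event_alt l m
  have h0 := sumA l 1; have h1 := sumA l 7; have h2 := sumA l 13
  have h3 := sumA l 19; have h4 := sumA l 25
  norm_num at h0 h1 h2 h3 h4
  simp only [accept_event, accept_event_alt, pvRegions, pvRegionLoop]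
  norm_num
  simp only [h0, h1, h2, h3, h4]
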